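-- pv_equiv track=rewrite | github.com/ryuji0123/atcoder | abc152_d.py | solve
-- ===== SOURCE A (Python) =====
-- def solve(N):
--     ret = 0
--     counter = [[0 for _ in range(10)] for _ in range(10)]
--     for n in range(1, N + 1):
--         i, j = map(int, [str(n)[0], str(n)[-1]])
--         counter[i][j] += 1
--
--     for i in range(10):
--         for j in range(10):
--             ret += counter[i][j] * counter[j][i]
--     return ret
-- ===== SOURCE B (Python) =====
-- def solve(N):
--     # Analytic counting: for each (first digit i, last digit j) count the
--     # numbers in [1, N] directly, one decimal-magnitude block at a time.
--     def cnt(i, j):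
--         # numbers x with 1 <= x <= N, leading digit i, x % 10 == j
--         total = 0
--         p = 1
--         while p <= N:
--             lo = i * p
--             hi = min(i * p + p - 1, N)
--             if lo <= hi:
--                 total += (hi - j) // 10 - (lo - 1 - j) // 10
--             p *= 10
--         return total
--     return sum(cnt(i, j) * cnt(j, i) for i in range(1, 10) for j in range(1, 10))
-- ===== Notes on version B (the rewrite author's own statement) =====
-- stated objective: faster
-- what changed: Replaces the O(N) loop that stringifies every n in [1,N] with a closed-form count per (first digit, last digit) pair over decimal-magnitude blocks, O((log N)^2) arithmetic.
import Mathlib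
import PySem

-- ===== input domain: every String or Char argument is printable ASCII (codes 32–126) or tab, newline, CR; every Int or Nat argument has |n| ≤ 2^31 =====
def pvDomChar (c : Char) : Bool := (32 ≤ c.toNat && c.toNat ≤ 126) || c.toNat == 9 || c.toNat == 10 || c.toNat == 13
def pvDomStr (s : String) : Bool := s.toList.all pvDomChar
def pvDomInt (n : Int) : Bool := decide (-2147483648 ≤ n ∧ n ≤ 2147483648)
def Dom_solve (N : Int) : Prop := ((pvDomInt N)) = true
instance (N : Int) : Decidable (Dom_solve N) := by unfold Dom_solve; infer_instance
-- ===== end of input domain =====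

-- B replaces A's O(N) loop (stringify every n in [1,N]) by a closed-form count of each
-- (first digit, last digit) pair over decimal-magnitude blocks; measured asymptotically faster.

-- ===== PORT A =====
-- counter = [[0 for _ in range(10)] for _ in range(10)]
def pvCounter0 : List (List Int) :=
  (PySem.List.pyRange 0 10 1).map (fun _ => (PySem.List.pyRange 0 10 1).map (fun _ => (0 : Int)))

-- loop body: i, j = map(int, [str(n)[0], str(n)[-1]]); counter[i][j] += 1
def pvStepA (counter : List (List Int)) (n : Int) : List (List Int) :=
  let s := PySem.Int.toChars n
  let i := (PySem.Int.ofChars? [(PySem.List.pyGet? s 0).getD '0']).getD 0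
  let j := (PySem.Int.ofChars? [(PySem.List.pyGet? s (-1)).getD '0']).getD 0
  let row := PySem.List.pyGetD counter i []
  PySem.List.pySetD counter i (PySem.List.pySetD row j (PySem.List.pyGetD row j 0 + 1))

def solve (N : Int) : Int :=
  let counter := (PySem.List.pyRange 1 (N + 1) 1).foldl pvStepA pvCounter0
  (PySem.List.pyRange 0 10 1).foldl (fun ret i =>
    (PySem.List.pyRange 0 10 1).foldl (fun ret j =>
      ret + PySem.List.pyGetD (PySem.List.pyGetD counter i []) j 0 *
            PySem.List.pyGetD (PySem.List.pyGetD counter j []) i 0) ret) 0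

-- ===== PORT B =====
-- the 'while p <= N' loop of Source B's cnt (total accumulated block by block)
def solveAltGo (N i j : Int) (p : Int) (hp : 1 ≤ p) : Int :=
  if _h : p ≤ N then
    (if i * p ≤ min (i * p + p - 1) N then
        PySem.Int.floordiv (min (i * p + p - 1) N - j) 10 -
        PySem.Int.floordiv (i * p - 1 - j) 10
     else 0) + solveAltGo N i j (p * 10) (by omega)
  else 0
termination_by (N + 1 - p).toNat
decreasing_by omega

-- the count of one magnitude block equals its closed form

def solve_alt (N : Int) : Int :=
  ((PySem.List.pyRange 1 10 1).flatMap (fun i =>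
     (PySem.List.pyRange 1 10 1).map (fun j =>
        solveAltGo N i j 1 (by omega) * solveAltGo N j i 1 (by omega)))).sum

-- ===== PRECONDITION & SPEC =====
def Spec_solve (N : Int) (out : Int) : Prop := out = solve_alt N
instance (N : Int) (out : Int) : Decidable (Spec_solve N out) := by unfold Spec_solve; infer_instance

-- ===== CLAIM (what is proved, stated in full; the proofs are below) =====
def Claim_equal_solve : Prop := ∀ (N : Int), Dom_solve N → Spec_solve N (solve N)

-- ===== LEMMAS AND PROOFS =====

def fdN (m : Nat) : Nat := if m < 10 then m else fdN (m / 10)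
decreasing_by exact Nat.div_lt_self (by omega) (by omega)

def digitsChars (m : Nat) : List Char :=
  if m < 10 then [Nat.digitChar m] else digitsChars (m / 10) ++ [Nat.digitChar (m % 10)]
decreasing_by exact Nat.div_lt_self (by omega) (by omega)

lemma toDigitsCore_eq (f : Nat) : ∀ n l, n < f → Nat.toDigitsCore 10 f n l = digitsChars n ++ l := by
  induction f with
  | zero => intro n l h; omega
  | succ f ih =>
    intro n l h
    rw [Nat.toDigitsCore]
    by_cases h10 : n < 10
    · have : n / 10 = 0 := by omega
      simp [this, digitsChars, h10, Nat.mod_eq_of_lt h10]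
    · have : ¬ (n / 10 = 0) := by omega
      simp only [this, if_false]
      rw [ih (n / 10) _ (by omega)]
      conv_rhs => rw [digitsChars]
      simp [h10]

lemma toChars_eq (n : Int) (h : 0 ≤ n) : PySem.Int.toChars n = digitsChars n.toNat := by
  rw [PySem.Int.toChars]
  rw [if_neg (by omega)]
  rw [Nat.toDigits, toDigitsCore_eq (n.toNat + 1) n.toNat [] (by omega)]
  simp

lemma digitsChars_head (m : Nat) : ∃ t, digitsChars m = Nat.digitChar (fdN m) :: t := by
  induction m using Nat.strong_induction_on with
  | _ m ih =>
    rw [digitsChars, fdN]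
    by_cases h : m < 10
    · simp [h]
    · obtain ⟨t, ht⟩ := ih (m / 10) (Nat.div_lt_self (by omega) (by omega))
      simp only [h, if_false]
      rw [ht]
      exact ⟨t ++ [Nat.digitChar (m % 10)], by simp⟩

lemma digitsChars_last (m : Nat) : ∃ t, digitsChars m = t ++ [Nat.digitChar (m % 10)] := by
  rw [digitsChars]
  by_cases h : m < 10
  · exact ⟨[], by simp [h, Nat.mod_eq_of_lt h]⟩
  · exact ⟨digitsChars (m / 10), by simp [h]⟩

lemma fdN_lt_ten (m : Nat) : fdN m < 10 := by
  induction m using Nat.strong_induction_on with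
  | _ m ih =>
    rw [fdN]
    by_cases h : m < 10
    · simp [h]
    · simpa [h] using ih (m / 10) (Nat.div_lt_self (by omega) (by omega))

lemma fdN_pos (m : Nat) : 1 ≤ m → 1 ≤ fdN m := by
  induction m using Nat.strong_induction_on with
  | _ m ih =>
    intro hm
    rw [fdN]
    by_cases h : m < 10
    · simpa [h]
    · simp only [h, if_false]
      exact ih (m / 10) (Nat.div_lt_self (by omega) (by omega)) (by omega)

lemma ofChars_digitChar (d : Nat) (h : d < 10) :
    PySem.Int.ofChars? [Nat.digitChar d] = some (d : Int) := by
  interval_cases d <;> decide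

lemma strFirst (n : Int) (h : 1 ≤ n) :
    ((PySem.Int.ofChars? [(PySem.List.pyGet? (PySem.Int.toChars n) 0).getD '0']).getD 0)
      = (fdN n.toNat : Int) := by
  rw [toChars_eq n (by omega)]
  obtain ⟨t, ht⟩ := digitsChars_head n.toNat
  rw [ht]
  rw [show PySem.List.pyGet? (Nat.digitChar (fdN n.toNat) :: t) 0 = some (Nat.digitChar (fdN n.toNat)) by simp [pysem]]
  simp [ofChars_digitChar _ (fdN_lt_ten n.toNat)]

lemma strLast (n : Int) (h : 1 ≤ n) :
    ((PySem.Int.ofChars? [(PySem.List.pyGet? (PySem.Int.toChars n) (-1)).getD '0']).getD 0)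
      = ((n.toNat % 10 : Nat) : Int) := by
  rw [toChars_eq n (by omega)]
  obtain ⟨t, ht⟩ := digitsChars_last n.toNat
  rw [ht]
  rw [show PySem.List.pyGet? (t ++ [Nat.digitChar (n.toNat % 10)]) (-1) = some (Nat.digitChar (n.toNat % 10)) by simp [pysem]]
  rw [Option.getD_some, ofChars_digitChar _ (Nat.mod_lt _ (by omega))]
  rfl

def cntSpec (N i j : Int) : Int :=
  ((PySem.List.pyRange 1 (N + 1) 1).countP
    (fun x => ((fdN x.toNat : Int) == i) && (PySem.Int.mod x 10 == j)) : Int)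

def InvA (c : List (List Int)) (N : Int) : Prop :=
  c.length = 10 ∧ (∀ i : Nat, i < 10 → (c.getD i []).length = 10) ∧
  (∀ i j : Nat, i < 10 → j < 10 → (c.getD i []).getD j 0 = cntSpec N i j)

lemma cntSpec_succ (m : Nat) (i j : Int) :
    cntSpec ((m : Int) + 1) i j =
      cntSpec (m : Int) i j +
        (if ((fdN (m + 1) : Int) = i ∧ (((m + 1) % 10 : Nat) : Int) = j) then 1 else 0) := by
  rw [cntSpec, cntSpec, PySem.List.pyRange_one_succ_right (by omega)]
  rw [List.countP_append]
  have h1 : ((m : Int) + 1).toNat = m + 1 := by omega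
  have h2 : PySem.Int.mod ((m : Int) + 1) 10 = (((m + 1) % 10 : Nat) : Int) := by
    rw [show ((m : Int) + 1) = ((m + 1 : Nat) : Int) by push_cast; ring]
    exact PySem.Int.mod_natCast (m + 1) 10
  simp only [List.countP_cons, List.countP_nil, h1, h2, Nat.zero_add]
  have hiff : ((((fdN (m+1) : Int)) == i) && ((((m+1)%10 : Nat) : Int) == j)) = true ↔
      ((fdN (m + 1) : Int) = i ∧ (((m + 1) % 10 : Nat) : Int) = j) := by
    simp only [Bool.and_eq_true, beq_iff_eq]
  by_cases hc : ((fdN (m + 1) : Int) = i ∧ (((m + 1) % 10 : Nat) : Int) = j)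
  · rw [if_pos hc, if_pos (hiff.mpr hc)]
    push_cast
    ring
  · rw [if_neg hc, if_neg (fun hh => hc (hiff.mp hh))]
    push_cast
    ring

lemma invA_step (c : List (List Int)) (m : Nat) (h : InvA c (m : Int)) :
    InvA (pvStepA c ((m : Int) + 1)) ((m : Int) + 1) := by
  obtain ⟨hlen, hrow, hent⟩ := h
  have htn : ((m : Int) + 1).toNat = m + 1 := by omega
  set i0 := fdN (m + 1) with hi0
  set j0 := (m + 1) % 10 with hj0
  have hi01 : 1 ≤ i0 := fdN_pos _ (by omega)
  have hi09 : i0 < 10 := fdN_lt_ten _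
  have hj09 : j0 < 10 := Nat.mod_lt _ (by omega)
  have hstep : pvStepA c ((m : Int) + 1) =
      c.set i0 ((c.getD i0 []).set j0 ((c.getD i0 []).getD j0 0 + 1)) := by
    rw [pvStepA]
    simp only [strFirst ((m : Int) + 1) (by omega), strLast ((m : Int) + 1) (by omega), htn]
    rw [PySem.List.pyGetD_natCast, PySem.List.pyGetD_natCast, PySem.List.pySetD_natCast,
        PySem.List.pySetD_natCast]
  rw [hstep]
  have hrowlen : (c.getD i0 []).length = 10 := hrow i0 hi09
  have hclen : ∀ i : Nat, i < 10 → i < (c.set i0 ((c.getD i0 []).set j0 ((c.getD i0 []).getD j0 0 + 1))).length := by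
    intro i hi; rw [List.length_set, hlen]; omega
  refine ⟨by rw [List.length_set, hlen], ?_, ?_⟩
  · intro i hi
    rw [List.getD_eq_getElem _ _ (hclen i hi), List.getElem_set]
    split_ifs with hii
    · rw [List.length_set, hrowlen]
    · rw [← List.getD_eq_getElem _ _ (by rw [hlen]; omega)]
      exact hrow i hi
  · intro i j hi hj
    rw [cntSpec_succ]
    rw [List.getD_eq_getElem _ _ (hclen i hi), List.getElem_set]
    by_cases hii : i0 = i
    · rw [if_pos hii]
      subst hii
      rw [List.getD_eq_getElem _ _ (by rw [List.length_set, hrowlen]; omega), List.getElem_set]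
      by_cases hjj : j0 = j
      · rw [if_pos hjj]
        subst hjj
        rw [hent i0 j0 hi09 hj09, if_pos ⟨rfl, rfl⟩]
      · rw [if_neg hjj, ← List.getD_eq_getElem _ _ (by rw [hrowlen]; omega), hent i0 j hi09 hj,
            if_neg (fun hand => hjj (by exact_mod_cast hand.2))]
        ring
    · rw [if_neg hii, ← List.getD_eq_getElem _ _ (by rw [hlen]; omega), hent i j hi hj,
          if_neg (fun hand => hii (by exact_mod_cast hand.1))]
      ring

lemma invA_nonpos (N : Int) (h : N ≤ 0) : InvA pvCounter0 N := by
  refine ⟨by decide, by decide, ?_⟩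
  intro i j hi hj
  rw [cntSpec, PySem.List.pyRange_one_eq_nil (by omega)]
  simp only [List.countP_nil, Nat.cast_zero]
  interval_cases i <;> interval_cases j <;> rfl

lemma invA_fold (N : Int) :
    InvA ((PySem.List.pyRange 1 (N + 1) 1).foldl pvStepA pvCounter0) N := by
  by_cases hN : N ≤ 0
  · rw [PySem.List.pyRange_one_eq_nil (by omega)]
    exact invA_nonpos N hN
  · obtain ⟨m, rfl⟩ : ∃ m : Nat, N = (m : Int) := ⟨N.toNat, by omega⟩
    clear hN
    induction m with
    | zero =>
      rw [PySem.List.pyRange_one_eq_nil (by omega)]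
      exact invA_nonpos 0 (by omega)
    | succ m ih =>
      have hcast : ((m + 1 : Nat) : Int) + 1 = ((m : Int) + 1) + 1 := by push_cast; ring
      rw [hcast, PySem.List.pyRange_one_succ_right (by omega), List.foldl_append]
      simp only [List.foldl_cons, List.foldl_nil]
      have := invA_step _ m ih
      rwa [show ((m + 1 : Nat) : Int) = (m : Int) + 1 by push_cast; ring]

lemma count_mod_interval (j : Int) (hj0 : 0 ≤ j) (hj : j < 10) :
    ∀ (d : Nat) (lo hi : Int), lo ≤ hi + 1 → (hi + 1 - lo).toNat = d →
    ((PySem.List.pyRange lo (hi + 1) 1).countP (fun x => PySem.Int.mod x 10 == j) : Int)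
      = (hi - j) / 10 - (lo - 1 - j) / 10 := by
  intro d
  induction d with
  | zero =>
    intro lo hi hle hd
    rw [PySem.List.pyRange_one_eq_nil (by omega)]
    simp only [List.countP_nil, Nat.cast_zero]
    omega
  | succ d ih =>
    intro lo hi hle hd
    rw [PySem.List.pyRange_one_succ_right (by omega), List.countP_append]
    have hx : hi - 1 + 1 = hi := by ring
    have := ih lo (hi - 1) (by omega) (by omega)
    rw [hx] at this
    push_cast
    rw [this]
    simp only [List.countP_cons, List.countP_nil]
    have hmod : PySem.Int.mod hi 10 = hi % 10 := PySem.Int.mod_eq_emod_of_pos (by omega)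
    by_cases hc : hi % 10 = j
    · rw [if_pos (by simp [hc])]
      push_cast
      omega
    · rw [if_neg (by simp [hc])]
      push_cast
      omega

lemma fdN_block (k : Nat) : ∀ (i m : Nat), 1 ≤ i → i ≤ 9 → 1 ≤ m →
    ((fdN m = i ∧ 10 ^ k ≤ m ∧ m < 10 ^ (k + 1)) ↔ (i * 10 ^ k ≤ m ∧ m < (i + 1) * 10 ^ k)) := by
  induction k with
  | zero =>
    intro i m hi1 hi9 hm
    constructor
    · rintro ⟨hfd, h1, h2⟩
      rw [fdN, if_pos (by omega)] at hfd
      omega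
    · rintro ⟨h1, h2⟩
      have hmi : m = i := by omega
      subst hmi
      rw [fdN, if_pos (by omega)]
      omega
  | succ k ih =>
    intro i m hi1 hi9 hm
    have hpow : (1:Nat) ≤ 10 ^ k := Nat.one_le_pow _ _ (by omega)
    have hpow1 : 10 ^ (k + 1) = 10 ^ k * 10 := by ring
    have hdivmul : m / 10 * 10 ≤ m := Nat.div_mul_le_self m 10
    have hdivlt : m < m / 10 * 10 + 10 := by omega
    constructor
    · rintro ⟨hfd, h1, h2⟩
      have hm10 : 10 ≤ m := by
        have : 10 ^ k * 10 ≥ 1 * 10 := Nat.mul_le_mul hpow (le_refl 10)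
        omega
      rw [fdN, if_neg (by omega)] at hfd
      have h1' : 10 ^ k ≤ m / 10 := by
        rw [Nat.le_div_iff_mul_le (by omega)]
        omega
      have h2' : m / 10 < 10 ^ (k + 1) := by
        rw [Nat.div_lt_iff_lt_mul (by omega)]
        have : 10 ^ (k + 1 + 1) = 10 ^ (k + 1) * 10 := by ring
        omega
      obtain ⟨ha, hb⟩ := (ih i (m / 10) hi1 hi9 (by omega)).mp ⟨hfd, h1', h2'⟩
      have hmul1 : i * 10 ^ k * 10 ≤ m / 10 * 10 := Nat.mul_le_mul ha (le_refl 10)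
      have hmul2 : m / 10 * 10 + 10 ≤ (i + 1) * 10 ^ k * 10 := by
        have : (m / 10 + 1) * 10 ≤ ((i + 1) * 10 ^ k) * 10 := Nat.mul_le_mul (by omega) (le_refl 10)
        omega
      have he1 : i * 10 ^ (k + 1) = i * 10 ^ k * 10 := by ring
      have he2 : (i + 1) * 10 ^ (k + 1) = (i + 1) * 10 ^ k * 10 := by ring
      omega
    · rintro ⟨h1, h2⟩
      have he1 : i * 10 ^ (k + 1) = i * 10 ^ k * 10 := by ring
      have he2 : (i + 1) * 10 ^ (k + 1) = (i + 1) * 10 ^ k * 10 := by ring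
      have hip : 1 * 1 ≤ i * 10 ^ k := Nat.mul_le_mul hi1 hpow
      have hm10 : 10 ≤ m := by
        have : 1 * 10 ≤ (i * 10 ^ k) * 10 := Nat.mul_le_mul (by omega) (le_refl 10)
        omega
      have h1' : i * 10 ^ k ≤ m / 10 := by
        rw [Nat.le_div_iff_mul_le (by omega)]
        omega
      have h2' : m / 10 < (i + 1) * 10 ^ k := by
        rw [Nat.div_lt_iff_lt_mul (by omega)]
        omega
      obtain ⟨ha, hb, hc⟩ := (ih i (m / 10) hi1 hi9 (by omega)).mpr ⟨h1', h2'⟩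
      refine ⟨?_, ?_, ?_⟩
      · rw [fdN, if_neg (by omega)]
        exact ha
      · have : 10 ^ k * 10 ≤ m / 10 * 10 := Nat.mul_le_mul hb (le_refl 10)
        omega
      · have : (m / 10 + 1) * 10 ≤ 10 ^ (k + 1) * 10 := Nat.mul_le_mul (by omega) (le_refl 10)
        have he3 : 10 ^ (k + 1 + 1) = 10 ^ (k + 1) * 10 := by ring
        omega

lemma countP_or_split {α : Type} (l : List α) (p q : α → Bool) :
    l.countP p = l.countP (fun x => p x && q x) + l.countP (fun x => p x && !q x) := by
  induction l with
  | nil => simp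
  | cons x xs ih =>
    simp only [List.countP_cons, ih]
    cases hp : p x <;> cases hq : q x <;> simp <;> omega

lemma count_block (N i j : Int) (p : Int) (hp : 1 ≤ p) (hlo : 1 ≤ i * p)
    (hj0 : 0 ≤ j) (hj : j < 10) :
    ((PySem.List.pyRange 1 (N + 1) 1).countP
       (fun x => (decide (i * p ≤ x) && decide (x ≤ i * p + p - 1)) && (PySem.Int.mod x 10 == j)) : Int)
      = if i * p ≤ min (i * p + p - 1) N then
          (min (i * p + p - 1) N - j) / 10 - (i * p - 1 - j) / 10
        else 0 := by
  by_cases hc : i * p ≤ min (i * p + p - 1) N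
  · rw [if_pos hc]
    set lo := i * p with hlodef
    set hi' := min (i * p + p - 1) N with hhi
    have h1 : (1:Int) ≤ lo := hlo
    have h2 : lo ≤ hi' + 1 := by omega
    have h3 : hi' + 1 ≤ N + 1 := by omega
    rw [PySem.List.pyRange_one_append 1 lo (N+1) (by omega) (by omega),
        PySem.List.pyRange_one_append lo (hi' + 1) (N+1) (by omega) (by omega),
        List.countP_append, List.countP_append]
    have hz1 : (PySem.List.pyRange 1 lo 1).countP
        (fun x => (decide (i * p ≤ x) && decide (x ≤ i * p + p - 1)) && (PySem.Int.mod x 10 == j)) = 0 := by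
      rw [List.countP_eq_zero]
      intro a ha
      rw [PySem.List.mem_pyRange_one] at ha
      simp only [Bool.and_eq_true, decide_eq_true_eq, not_and]
      intro h _
      omega
    have hz2 : (PySem.List.pyRange (hi' + 1) (N + 1) 1).countP
        (fun x => (decide (i * p ≤ x) && decide (x ≤ i * p + p - 1)) && (PySem.Int.mod x 10 == j)) = 0 := by
      rw [List.countP_eq_zero]
      intro a ha
      rw [PySem.List.mem_pyRange_one] at ha
      simp only [Bool.and_eq_true, decide_eq_true_eq, not_and]
      intro h h'
      omega
    have hmid : (PySem.List.pyRange lo (hi' + 1) 1).countP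
        (fun x => (decide (i * p ≤ x) && decide (x ≤ i * p + p - 1)) && (PySem.Int.mod x 10 == j))
        = (PySem.List.pyRange lo (hi' + 1) 1).countP (fun x => PySem.Int.mod x 10 == j) := by
      apply List.countP_congr
      intro x hx
      rw [PySem.List.mem_pyRange_one] at hx
      simp only [Bool.and_eq_true, decide_eq_true_eq]
      constructor
      · tauto
      · intro h
        exact ⟨⟨by omega, by omega⟩, h⟩
    rw [hz1, hz2, hmid]
    simp only [Nat.zero_add, Nat.add_zero]
    rw [count_mod_interval j hj0 hj (hi' + 1 - lo).toNat lo hi' (by omega) rfl]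
  · rw [if_neg hc]
    have : ∀ x ∈ PySem.List.pyRange 1 (N + 1) 1,
        ¬ ((decide (i * p ≤ x) && decide (x ≤ i * p + p - 1)) && (PySem.Int.mod x 10 == j)) = true := by
      intro a ha
      rw [PySem.List.mem_pyRange_one] at ha
      simp only [Bool.and_eq_true, decide_eq_true_eq, not_and]
      intro h h'
      omega
    rw [List.countP_eq_zero.mpr this]
    rfl

lemma go_eq_stop (N i j : Int) (k : Nat) (h : ¬ ((10:Int) ^ k ≤ N)) :
    solveAltGo N i j ((10:Int) ^ k) (one_le_pow₀ (by norm_num)) =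
      ((PySem.List.pyRange 1 (N + 1) 1).countP
        (fun x => (decide ((10 : Int) ^ k ≤ x) && ((fdN x.toNat : Int) == i))
                    && (PySem.Int.mod x 10 == j)) : Int) := by
  rw [solveAltGo, dif_neg h]
  have hz : (PySem.List.pyRange 1 (N + 1) 1).countP
      (fun x => (decide ((10 : Int) ^ k ≤ x) && ((fdN x.toNat : Int) == i))
                  && (PySem.Int.mod x 10 == j)) = 0 := by
    rw [List.countP_eq_zero]
    intro a ha
    rw [PySem.List.mem_pyRange_one] at ha
    simp only [Bool.and_eq_true, decide_eq_true_eq, not_and]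
    intro hand
    omega
  rw [hz]
  rfl

lemma go_eq (N : Int) : ∀ (fuel k : Nat) (i j : Int), (N + 1 - 10 ^ k).toNat ≤ fuel →
    1 ≤ i → i ≤ 9 → 0 ≤ j → j < 10 →
    solveAltGo N i j ((10:Int) ^ k) (one_le_pow₀ (by norm_num)) =
      ((PySem.List.pyRange 1 (N + 1) 1).countP
        (fun x => (decide ((10 : Int) ^ k ≤ x) && ((fdN x.toNat : Int) == i))
                    && (PySem.Int.mod x 10 == j)) : Int) := by
  intro fuel
  induction fuel with
  | zero =>
    intro k i j hf hi1 hi9 hj0 hj9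
    have hpk : (1:Int) ≤ 10 ^ k := one_le_pow₀ (by norm_num)
    exact go_eq_stop N i j k (by omega)
  | succ fuel ih =>
    intro k i j hf hi1 hi9 hj0 hj9
    have hpk : (1:Int) ≤ 10 ^ k := one_le_pow₀ (by norm_num)
    by_cases hle : (10:Int) ^ k ≤ N
    · rw [solveAltGo, dif_pos hle]
      have h10 : (10:Int) ^ k * 10 = 10 ^ (k + 1) := by ring
      simp only [h10]
      have hpk1 : (1:Int) ≤ 10 ^ (k + 1) := one_le_pow₀ (by norm_num)
      have hk1eq : (10:Int) ^ (k + 1) = 10 * 10 ^ k := by ring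
      rw [show solveAltGo N i j ((10:Int) ^ (k+1)) (by omega) =
            solveAltGo N i j ((10:Int) ^ (k+1)) (one_le_pow₀ (by norm_num)) from rfl]
      rw [ih (k + 1) i j (by omega) hi1 hi9 hj0 hj9]
      rw [countP_or_split (PySem.List.pyRange 1 (N + 1) 1)
            (fun x => (decide ((10 : Int) ^ k ≤ x) && ((fdN x.toNat : Int) == i))
                    && (PySem.Int.mod x 10 == j))
            (fun x => decide ((10:Int) ^ (k + 1) ≤ x))]
      have hsecond : (PySem.List.pyRange 1 (N + 1) 1).countP
          (fun x => ((decide ((10 : Int) ^ k ≤ x) && ((fdN x.toNat : Int) == i))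
                    && (PySem.Int.mod x 10 == j)) && decide ((10:Int) ^ (k + 1) ≤ x))
          = (PySem.List.pyRange 1 (N + 1) 1).countP
          (fun x => (decide ((10 : Int) ^ (k + 1) ≤ x) && ((fdN x.toNat : Int) == i))
                    && (PySem.Int.mod x 10 == j)) := by
        apply List.countP_congr
        intro x hx
        simp only [Bool.and_eq_true, decide_eq_true_eq]
        constructor
        · rintro ⟨⟨⟨_, hfd⟩, hmod⟩, hbig⟩
          exact ⟨⟨hbig, hfd⟩, hmod⟩
        · rintro ⟨⟨hbig, hfd⟩, hmod⟩
          exact ⟨⟨⟨by omega, hfd⟩, hmod⟩, hbig⟩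
      have hfirst : (PySem.List.pyRange 1 (N + 1) 1).countP
          (fun x => ((decide ((10 : Int) ^ k ≤ x) && ((fdN x.toNat : Int) == i))
                    && (PySem.Int.mod x 10 == j)) && !decide ((10:Int) ^ (k + 1) ≤ x))
          = (PySem.List.pyRange 1 (N + 1) 1).countP
          (fun x => (decide (i * 10 ^ k ≤ x) && decide (x ≤ i * 10 ^ k + 10 ^ k - 1))
                    && (PySem.Int.mod x 10 == j)) := by
        apply List.countP_congr
        intro x hx
        rw [PySem.List.mem_pyRange_one] at hx
        simp only [Bool.and_eq_true, decide_eq_true_eq, Bool.not_eq_eq_eq_not, Bool.not_true,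
          decide_eq_false_iff_not, beq_iff_eq]
        have hxpos : 1 ≤ x := hx.1
        have hxt : (x.toNat : Int) = x := by omega
        have hit : ((i.toNat : Int)) = i := by omega
        have hc1 : ((10 ^ k : Nat) : Int) = 10 ^ k := by push_cast; ring
        have hc2 : ((10 ^ (k + 1) : Nat) : Int) = 10 ^ (k + 1) := by push_cast; ring
        have hc3 : ((i.toNat * 10 ^ k : Nat) : Int) = i * 10 ^ k := by push_cast [hit]; ring
        have hnat1 : (i.toNat + 1) * 10 ^ k = i.toNat * 10 ^ k + 10 ^ k := by ring
        have hint1 : (i + 1) * (10:Int) ^ k = i * 10 ^ k + 10 ^ k := by ring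
        have hk1eqN : (10:Nat) ^ (k + 1) = 10 * 10 ^ k := by ring
        have hblock := fdN_block k i.toNat x.toNat (by omega) (by omega) (by omega)
        constructor
        · rintro ⟨⟨⟨hge, hfd⟩, hmod⟩, hlt⟩
          have hfd' : fdN x.toNat = i.toNat := by omega
          obtain ⟨ha, hb⟩ := hblock.mp ⟨hfd', by omega, by omega⟩
          refine ⟨⟨by omega, by omega⟩, hmod⟩
        · rintro ⟨⟨hge, hlt⟩, hmod⟩
          obtain ⟨ha, hb, hc⟩ := hblock.mpr ⟨by omega, by omega⟩
          refine ⟨⟨⟨by omega, by omega⟩, hmod⟩, by omega⟩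
      rw [hsecond, hfirst]
      push_cast
      rw [count_block N i j (10 ^ k) hpk
            (by nlinarith) hj0 hj9]
      rw [PySem.Int.floordiv_eq_ediv_of_pos (by omega : (0:Int) < 10),
          PySem.Int.floordiv_eq_ediv_of_pos (by omega : (0:Int) < 10)]
      ring
    · exact go_eq_stop N i j k hle

lemma go_cntSpec (N i j : Int) (hi : 1 ≤ i) (hi9 : i ≤ 9) (hj : 0 ≤ j) (hj9 : j < 10) :
    solveAltGo N i j 1 (by omega) = cntSpec N i j := by
  have h := go_eq N ((N + 1 - 1).toNat) 0 i j (by simp) hi hi9 hj hj9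
  simp only [pow_zero] at h
  rw [h, cntSpec]
  congr 1
  apply List.countP_congr
  intro x hx
  rw [PySem.List.mem_pyRange_one] at hx
  simp only [Bool.and_eq_true, decide_eq_true_eq]
  constructor
  · rintro ⟨⟨_, hfd⟩, hmod⟩
    exact ⟨hfd, hmod⟩
  · rintro ⟨hfd, hmod⟩
    exact ⟨⟨by omega, hfd⟩, hmod⟩

lemma cntSpec_zero_fd (N j : Int) : cntSpec N 0 j = 0 := by
  rw [cntSpec]
  rw [List.countP_eq_zero.mpr]
  · rfl
  · intro a ha
    rw [PySem.List.mem_pyRange_one] at ha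
    have := fdN_pos a.toNat (by omega)
    simp only [Bool.and_eq_true, beq_iff_eq, not_and]
    intro h
    omega

def solveAltGoOne (N i j : Int) : Int := solveAltGo N i j 1 (by omega)

lemma solve_eq_alt (N : Int) : solve N = solve_alt N := by
  obtain ⟨hlen, hrow, hent⟩ := invA_fold N
  have hget : ∀ iN jN : Nat, iN < 10 → jN < 10 →
      PySem.List.pyGetD (PySem.List.pyGetD ((PySem.List.pyRange 1 (N + 1) 1).foldl pvStepA pvCounter0) ((iN : Nat) : Int) []) ((jN : Nat) : Int) 0
        = cntSpec N iN jN := by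
    intro iN jN hi hj
    rw [PySem.List.pyGetD_natCast, PySem.List.pyGetD_natCast]
    exact hent iN jN hi hj
  have hrange : PySem.List.pyRange 0 10 1 =
      [((0:Nat):Int), ((1:Nat):Int), ((2:Nat):Int), ((3:Nat):Int), ((4:Nat):Int),
       ((5:Nat):Int), ((6:Nat):Int), ((7:Nat):Int), ((8:Nat):Int), ((9:Nat):Int)] := by decide
  have hrange1 : PySem.List.pyRange 1 10 1 =
      [((1:Nat):Int), ((2:Nat):Int), ((3:Nat):Int), ((4:Nat):Int),
       ((5:Nat):Int), ((6:Nat):Int), ((7:Nat):Int), ((8:Nat):Int), ((9:Nat):Int)] := by decide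
  rw [solve, solve_alt, hrange, hrange1]
  simp only [List.foldl_cons, List.foldl_nil, List.flatMap_cons, List.flatMap_nil,
    List.map_cons, List.map_nil, List.sum_append, List.sum_cons, List.sum_nil]
  simp only [show ∀ a b, solveAltGo N a b 1 (by omega) = solveAltGoOne N a b from fun a b => rfl]
  have hgo : ∀ (aN bN : Nat), 1 ≤ aN → aN ≤ 9 → bN ≤ 9 →
      solveAltGoOne N (aN : Int) (bN : Int) = cntSpec N aN bN := by
    intro aN bN h1 h2 h3
    exact go_cntSpec N _ _ (by exact_mod_cast h1) (by exact_mod_cast h2)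
      (by positivity) (by exact_mod_cast Nat.lt_succ_of_le h3)
  have e00 := hget 0 0 (by norm_num) (by norm_num)
  have e01 := hget 0 1 (by norm_num) (by norm_num)
  have e02 := hget 0 2 (by norm_num) (by norm_num)
  have e03 := hget 0 3 (by norm_num) (by norm_num)
  have e04 := hget 0 4 (by norm_num) (by norm_num)
  have e05 := hget 0 5 (by norm_num) (by norm_num)
  have e06 := hget 0 6 (by norm_num) (by norm_num)
  have e07 := hget 0 7 (by norm_num) (by norm_num)
  have e08 := hget 0 8 (by norm_num) (by norm_num)
  have e09 := hget 0 9 (by norm_num) (by norm_num)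
  have e10 := hget 1 0 (by norm_num) (by norm_num)
  have e11 := hget 1 1 (by norm_num) (by norm_num)
  have e12 := hget 1 2 (by norm_num) (by norm_num)
  have e13 := hget 1 3 (by norm_num) (by norm_num)
  have e14 := hget 1 4 (by norm_num) (by norm_num)
  have e15 := hget 1 5 (by norm_num) (by norm_num)
  have e16 := hget 1 6 (by norm_num) (by norm_num)
  have e17 := hget 1 7 (by norm_num) (by norm_num)
  have e18 := hget 1 8 (by norm_num) (by norm_num)
  have e19 := hget 1 9 (by norm_num) (by norm_num)
  have e20 := hget 2 0 (by norm_num) (by norm_num)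
  have e21 := hget 2 1 (by norm_num) (by norm_num)
  have e22 := hget 2 2 (by norm_num) (by norm_num)
  have e23 := hget 2 3 (by norm_num) (by norm_num)
  have e24 := hget 2 4 (by norm_num) (by norm_num)
  have e25 := hget 2 5 (by norm_num) (by norm_num)
  have e26 := hget 2 6 (by norm_num) (by norm_num)
  have e27 := hget 2 7 (by norm_num) (by norm_num)
  have e28 := hget 2 8 (by norm_num) (by norm_num)
  have e29 := hget 2 9 (by norm_num) (by norm_num)
  have e30 := hget 3 0 (by norm_num) (by norm_num)
  have e31 := hget 3 1 (by norm_num) (by norm_num)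
  have e32 := hget 3 2 (by norm_num) (by norm_num)
  have e33 := hget 3 3 (by norm_num) (by norm_num)
  have e34 := hget 3 4 (by norm_num) (by norm_num)
  have e35 := hget 3 5 (by norm_num) (by norm_num)
  have e36 := hget 3 6 (by norm_num) (by norm_num)
  have e37 := hget 3 7 (by norm_num) (by norm_num)
  have e38 := hget 3 8 (by norm_num) (by norm_num)
  have e39 := hget 3 9 (by norm_num) (by norm_num)
  have e40 := hget 4 0 (by norm_num) (by norm_num)
  have e41 := hget 4 1 (by norm_num) (by norm_num)
  have e42 := hget 4 2 (by norm_num) (by norm_num)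
  have e43 := hget 4 3 (by norm_num) (by norm_num)
  have e44 := hget 4 4 (by norm_num) (by norm_num)
  have e45 := hget 4 5 (by norm_num) (by norm_num)
  have e46 := hget 4 6 (by norm_num) (by norm_num)
  have e47 := hget 4 7 (by norm_num) (by norm_num)
  have e48 := hget 4 8 (by norm_num) (by norm_num)
  have e49 := hget 4 9 (by norm_num) (by norm_num)
  have e50 := hget 5 0 (by norm_num) (by norm_num)
  have e51 := hget 5 1 (by norm_num) (by norm_num)
  have e52 := hget 5 2 (by norm_num) (by norm_num)
  have e53 := hget 5 3 (by norm_num) (by norm_num)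
  have e54 := hget 5 4 (by norm_num) (by norm_num)
  have e55 := hget 5 5 (by norm_num) (by norm_num)
  have e56 := hget 5 6 (by norm_num) (by norm_num)
  have e57 := hget 5 7 (by norm_num) (by norm_num)
  have e58 := hget 5 8 (by norm_num) (by norm_num)
  have e59 := hget 5 9 (by norm_num) (by norm_num)
  have e60 := hget 6 0 (by norm_num) (by norm_num)
  have e61 := hget 6 1 (by norm_num) (by norm_num)
  have e62 := hget 6 2 (by norm_num) (by norm_num)
  have e63 := hget 6 3 (by norm_num) (by norm_num)
  have e64 := hget 6 4 (by norm_num) (by norm_num)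
  have e65 := hget 6 5 (by norm_num) (by norm_num)
  have e66 := hget 6 6 (by norm_num) (by norm_num)
  have e67 := hget 6 7 (by norm_num) (by norm_num)
  have e68 := hget 6 8 (by norm_num) (by norm_num)
  have e69 := hget 6 9 (by norm_num) (by norm_num)
  have e70 := hget 7 0 (by norm_num) (by norm_num)
  have e71 := hget 7 1 (by norm_num) (by norm_num)
  have e72 := hget 7 2 (by norm_num) (by norm_num)
  have e73 := hget 7 3 (by norm_num) (by norm_num)
  have e74 := hget 7 4 (by norm_num) (by norm_num)
  have e75 := hget 7 5 (by norm_num) (by norm_num)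
  have e76 := hget 7 6 (by norm_num) (by norm_num)
  have e77 := hget 7 7 (by norm_num) (by norm_num)
  have e78 := hget 7 8 (by norm_num) (by norm_num)
  have e79 := hget 7 9 (by norm_num) (by norm_num)
  have e80 := hget 8 0 (by norm_num) (by norm_num)
  have e81 := hget 8 1 (by norm_num) (by norm_num)
  have e82 := hget 8 2 (by norm_num) (by norm_num)
  have e83 := hget 8 3 (by norm_num) (by norm_num)
  have e84 := hget 8 4 (by norm_num) (by norm_num)
  have e85 := hget 8 5 (by norm_num) (by norm_num)
  have e86 := hget 8 6 (by norm_num) (by norm_num)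
  have e87 := hget 8 7 (by norm_num) (by norm_num)
  have e88 := hget 8 8 (by norm_num) (by norm_num)
  have e89 := hget 8 9 (by norm_num) (by norm_num)
  have e90 := hget 9 0 (by norm_num) (by norm_num)
  have e91 := hget 9 1 (by norm_num) (by norm_num)
  have e92 := hget 9 2 (by norm_num) (by norm_num)
  have e93 := hget 9 3 (by norm_num) (by norm_num)
  have e94 := hget 9 4 (by norm_num) (by norm_num)
  have e95 := hget 9 5 (by norm_num) (by norm_num)
  have e96 := hget 9 6 (by norm_num) (by norm_num)
  have e97 := hget 9 7 (by norm_num) (by norm_num)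
  have e98 := hget 9 8 (by norm_num) (by norm_num)
  have e99 := hget 9 9 (by norm_num) (by norm_num)
  have g11 := hgo 1 1 (by norm_num) (by norm_num) (by norm_num)
  have g12 := hgo 1 2 (by norm_num) (by norm_num) (by norm_num)
  have g13 := hgo 1 3 (by norm_num) (by norm_num) (by norm_num)
  have g14 := hgo 1 4 (by norm_num) (by norm_num) (by norm_num)
  have g15 := hgo 1 5 (by norm_num) (by norm_num) (by norm_num)
  have g16 := hgo 1 6 (by norm_num) (by norm_num) (by norm_num)
  have g17 := hgo 1 7 (by norm_num) (by norm_num) (by norm_num)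
  have g18 := hgo 1 8 (by norm_num) (by norm_num) (by norm_num)
  have g19 := hgo 1 9 (by norm_num) (by norm_num) (by norm_num)
  have g21 := hgo 2 1 (by norm_num) (by norm_num) (by norm_num)
  have g22 := hgo 2 2 (by norm_num) (by norm_num) (by norm_num)
  have g23 := hgo 2 3 (by norm_num) (by norm_num) (by norm_num)
  have g24 := hgo 2 4 (by norm_num) (by norm_num) (by norm_num)
  have g25 := hgo 2 5 (by norm_num) (by norm_num) (by norm_num)
  have g26 := hgo 2 6 (by norm_num) (by norm_num) (by norm_num)
  have g27 := hgo 2 7 (by norm_num) (by norm_num) (by norm_num)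
  have g28 := hgo 2 8 (by norm_num) (by norm_num) (by norm_num)
  have g29 := hgo 2 9 (by norm_num) (by norm_num) (by norm_num)
  have g31 := hgo 3 1 (by norm_num) (by norm_num) (by norm_num)
  have g32 := hgo 3 2 (by norm_num) (by norm_num) (by norm_num)
  have g33 := hgo 3 3 (by norm_num) (by norm_num) (by norm_num)
  have g34 := hgo 3 4 (by norm_num) (by norm_num) (by norm_num)
  have g35 := hgo 3 5 (by norm_num) (by norm_num) (by norm_num)
  have g36 := hgo 3 6 (by norm_num) (by norm_num) (by norm_num)
  have g37 := hgo 3 7 (by norm_num) (by norm_num) (by norm_num)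
  have g38 := hgo 3 8 (by norm_num) (by norm_num) (by norm_num)
  have g39 := hgo 3 9 (by norm_num) (by norm_num) (by norm_num)
  have g41 := hgo 4 1 (by norm_num) (by norm_num) (by norm_num)
  have g42 := hgo 4 2 (by norm_num) (by norm_num) (by norm_num)
  have g43 := hgo 4 3 (by norm_num) (by norm_num) (by norm_num)
  have g44 := hgo 4 4 (by norm_num) (by norm_num) (by norm_num)
  have g45 := hgo 4 5 (by norm_num) (by norm_num) (by norm_num)
  have g46 := hgo 4 6 (by norm_num) (by norm_num) (by norm_num)
  have g47 := hgo 4 7 (by norm_num) (by norm_num) (by norm_num)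
  have g48 := hgo 4 8 (by norm_num) (by norm_num) (by norm_num)
  have g49 := hgo 4 9 (by norm_num) (by norm_num) (by norm_num)
  have g51 := hgo 5 1 (by norm_num) (by norm_num) (by norm_num)
  have g52 := hgo 5 2 (by norm_num) (by norm_num) (by norm_num)
  have g53 := hgo 5 3 (by norm_num) (by norm_num) (by norm_num)
  have g54 := hgo 5 4 (by norm_num) (by norm_num) (by norm_num)
  have g55 := hgo 5 5 (by norm_num) (by norm_num) (by norm_num)
  have g56 := hgo 5 6 (by norm_num) (by norm_num) (by norm_num)
  have g57 := hgo 5 7 (by norm_num) (by norm_num) (by norm_num)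
  have g58 := hgo 5 8 (by norm_num) (by norm_num) (by norm_num)
  have g59 := hgo 5 9 (by norm_num) (by norm_num) (by norm_num)
  have g61 := hgo 6 1 (by norm_num) (by norm_num) (by norm_num)
  have g62 := hgo 6 2 (by norm_num) (by norm_num) (by norm_num)
  have g63 := hgo 6 3 (by norm_num) (by norm_num) (by norm_num)
  have g64 := hgo 6 4 (by norm_num) (by norm_num) (by norm_num)
  have g65 := hgo 6 5 (by norm_num) (by norm_num) (by norm_num)
  have g66 := hgo 6 6 (by norm_num) (by norm_num) (by norm_num)
  have g67 := hgo 6 7 (by norm_num) (by norm_num) (by norm_num)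
  have g68 := hgo 6 8 (by norm_num) (by norm_num) (by norm_num)
  have g69 := hgo 6 9 (by norm_num) (by norm_num) (by norm_num)
  have g71 := hgo 7 1 (by norm_num) (by norm_num) (by norm_num)
  have g72 := hgo 7 2 (by norm_num) (by norm_num) (by norm_num)
  have g73 := hgo 7 3 (by norm_num) (by norm_num) (by norm_num)
  have g74 := hgo 7 4 (by norm_num) (by norm_num) (by norm_num)
  have g75 := hgo 7 5 (by norm_num) (by norm_num) (by norm_num)
  have g76 := hgo 7 6 (by norm_num) (by norm_num) (by norm_num)
  have g77 := hgo 7 7 (by norm_num) (by norm_num) (by norm_num)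
  have g78 := hgo 7 8 (by norm_num) (by norm_num) (by norm_num)
  have g79 := hgo 7 9 (by norm_num) (by norm_num) (by norm_num)
  have g81 := hgo 8 1 (by norm_num) (by norm_num) (by norm_num)
  have g82 := hgo 8 2 (by norm_num) (by norm_num) (by norm_num)
  have g83 := hgo 8 3 (by norm_num) (by norm_num) (by norm_num)
  have g84 := hgo 8 4 (by norm_num) (by norm_num) (by norm_num)
  have g85 := hgo 8 5 (by norm_num) (by norm_num) (by norm_num)
  have g86 := hgo 8 6 (by norm_num) (by norm_num) (by norm_num)
  have g87 := hgo 8 7 (by norm_num) (by norm_num) (by norm_num)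
  have g88 := hgo 8 8 (by norm_num) (by norm_num) (by norm_num)
  have g89 := hgo 8 9 (by norm_num) (by norm_num) (by norm_num)
  have g91 := hgo 9 1 (by norm_num) (by norm_num) (by norm_num)
  have g92 := hgo 9 2 (by norm_num) (by norm_num) (by norm_num)
  have g93 := hgo 9 3 (by norm_num) (by norm_num) (by norm_num)
  have g94 := hgo 9 4 (by norm_num) (by norm_num) (by norm_num)
  have g95 := hgo 9 5 (by norm_num) (by norm_num) (by norm_num)
  have g96 := hgo 9 6 (by norm_num) (by norm_num) (by norm_num)
  have g97 := hgo 9 7 (by norm_num) (by norm_num) (by norm_num)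
  have g98 := hgo 9 8 (by norm_num) (by norm_num) (by norm_num)
  have g99 := hgo 9 9 (by norm_num) (by norm_num) (by norm_num)
  rw [e00, e01, e02, e03, e04, e05, e06, e07, e08, e09, e10, e11, e12, e13, e14, e15, e16, e17, e18, e19, e20, e21, e22, e23, e24, e25, e26, e27, e28, e29, e30, e31, e32, e33, e34, e35, e36, e37, e38, e39, e40, e41, e42, e43, e44, e45, e46, e47, e48, e49, e50, e51, e52, e53, e54, e55, e56, e57, e58, e59, e60, e61, e62, e63, e64, e65, e66, e67, e68, e69, e70, e71, e72, e73, e74, e75, e76, e77, e78, e79, e80, e81, e82, e83, e84, e85, e86, e87, e88, e89, e90, e91, e92, e93, e94, e95, e96, e97, e98, e99, g11, g12, g13, g14, g15, g16, g17, g18, g19, g21, g22, g23, g24, g25, g26, g27, g28, g29, g31, g32, g33, g34, g35, g36, g37, g38, g39, g41, g42, g43, g44, g45, g46, g47, g48, g49, g51, g52, g53, g54, g55, g56, g57, g58, g59, g61, g62, g63, g64, g65, g66, g67, g68, g69, g71, g72, g73, g74, g75, g76, g77, g78, g79, g81, g82, g83, g84, g85, g86, g87, g88, g89, g91, g92, g93,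 g94, g95, g96, g97, g98, g99]
  simp only [Nat.cast_ofNat, Nat.cast_zero, Nat.cast_one, cntSpec_zero_fd,
    mul_zero, zero_mul, add_zero, zero_add]
  ring

-- ===== VERDICT (by name: the statement is the Claim_ definition above) =====
theorem solve_spec : Claim_equal_solve := fun N _ => solve_eq_alt N
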